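-- pv_equiv track=rewrite | github.com/AlvinNgo123/leetcode_practice | generate_doc.py | generate_doc
-- ===== SOURCE A (Python) =====
-- def generate_doc(characters, document):
-- 	#First check if the list of chars is less than document. If it is, we know its false
-- 	#Traverse through list chars and add each char & their count to a dictionary
-- 	#Now, traverse through the list document and compare each doc's char to the dict
-- 		#If the doc's current char is in the dict, decrement that char's count
-- 		#If the doc's current char isn't in the dict or that char's count is 0, return False
-- 	#If you're able to traverse all the way to the end, we know we can return true.
--
-- 	if len(characters) < len(document):
-- 		return False
--
-- 	charCountDict = {}
-- 	for char in characters: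
-- 		if char in charCountDict:
-- 			charCountDict[char] += 1
-- 		else:
-- 			charCountDict[char] = 1
--
-- 	for char in document:
-- 		if char in charCountDict:
-- 			if charCountDict[char] == 0:
-- 				return False
-- 			charCountDict[char] -= 1
-- 		else:
-- 			return False
-- 	return True
-- ===== SOURCE B (Python) =====
-- def generate_doc(characters, document):
-- 	# Sort both strings, then one merge scan over the two sorted sequences
-- 	# checks multiset containment: no length guard, no counting dict.
-- 	cs = sorted(characters)
-- 	ds = sorted(document)
-- 	i = j = 0
-- 	while j < len(ds):
-- 		if i == len(cs):
-- 			return False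
-- 		c, d = cs[i], ds[j]
-- 		if c < d:
-- 			i += 1
-- 		elif c == d:
-- 			i += 1
-- 			j += 1
-- 		else:
-- 			return False
-- 	return True
-- ===== Notes on version B (the rewrite author's own statement) =====
-- stated objective: alternative
-- what changed: Replaces the length guard plus dict-counting/decrement scan by sorting both strings and checking sub-multiset containment with a single two-pointer merge scan over the sorted sequences; no counting structure at all.
import Mathlib
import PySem

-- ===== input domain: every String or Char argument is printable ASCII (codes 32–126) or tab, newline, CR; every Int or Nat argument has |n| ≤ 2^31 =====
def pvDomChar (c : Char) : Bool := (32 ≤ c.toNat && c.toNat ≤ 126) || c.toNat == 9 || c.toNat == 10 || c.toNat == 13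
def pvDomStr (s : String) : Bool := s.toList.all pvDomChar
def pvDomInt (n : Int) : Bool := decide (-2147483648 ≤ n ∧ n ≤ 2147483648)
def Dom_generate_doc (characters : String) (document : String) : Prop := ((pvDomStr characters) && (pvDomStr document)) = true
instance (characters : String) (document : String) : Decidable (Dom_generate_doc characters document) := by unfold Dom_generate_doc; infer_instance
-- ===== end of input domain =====

-- B replaces the length guard and the counting-dict decrement scan by sorting both strings and
-- checking sub-multiset containment with one two-pointer merge scan (alternative algorithm, similar cost).

-- ===== PORT A =====
-- the second for-loop of A: scan `document`, decrementing the count of each char, with both early returns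
def pvLoopA : List Char → PySem.Dict Char Int → Bool
  | [], _ => true
  | c :: rest, d =>
      if d.contains c then
        if d.getD c 0 == 0 then false
        else pvLoopA rest (d.insert c (d.getD c 0 - 1))
      else false

def generate_doc (characters : String) (document : String) : Bool :=
  if characters.toList.length < document.toList.length then false
  else
    -- first for-loop: build charCountDict from `characters`
    let charCountDict := characters.toList.foldl
      (fun d c => if d.contains c then d.insert c (d.getD c 0 + 1) else d.insert c 1)
      (PySem.Dict.empty : PySem.Dict Char Int)
    pvLoopA document.toList charCountDict

-- ===== PORT B =====
-- B's while-loop over index pointers i (into cs) and j (into ds); the two indices are modelled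
-- by the remaining suffixes cs[i:] and ds[j:], with the same comparisons in the same order.
def pvMergeB : List Char → List Char → Bool
  | _, [] => true                      -- j == len(ds): loop exits, return True
  | [], _ :: _ => false                -- i == len(cs): return False
  | c :: cr, d :: dr =>
      if c < d then pvMergeB cr (d :: dr)      -- i += 1
      else if c = d then pvMergeB cr dr        -- i += 1; j += 1
      else false

def generate_doc_alt (characters : String) (document : String) : Bool :=
  let cs := PySem.List.sorted characters.toList (fun c => c) false
  let ds := PySem.List.sorted document.toList (fun c => c) false
  pvMergeB cs ds

-- ===== PRECONDITION & SPEC =====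
def Spec_generate_doc (characters : String) (document : String) (out : Bool) : Prop := out = generate_doc_alt characters document
instance (characters : String) (document : String) (out : Bool) : Decidable (Spec_generate_doc characters document out) := by unfold Spec_generate_doc; infer_instance

-- ===== CLAIM (what is proved, stated in full; the proofs are below) =====
def Claim_equal_generate_doc : Prop := ∀ (characters : String) (document : String), Dom_generate_doc characters document → Spec_generate_doc characters document (generate_doc characters document)

-- ===== LEMMAS AND PROOFS =====

-- general counter lemma for A's build loop (branch on contains collapses via getD)
theorem pvBuildA_getD_gen (l : List Char) (d : PySem.Dict Char Int) (v : Char) :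
    (l.foldl (fun d c => if d.contains c then d.insert c (d.getD c 0 + 1) else d.insert c 1)
      d).getD v 0 = d.getD v 0 + l.count v := by
  induction l generalizing d with
  | nil => simp
  | cons c rest ih =>
    simp only [List.foldl_cons, ih]
    by_cases hc : d.contains c = true
    · simp only [hc, if_true, PySem.Dict.getD_insert]
      by_cases hv : v = c
      · subst hv; rw [if_pos rfl, List.count_cons_self]; push_cast; ring
      · rw [if_neg hv, List.count_cons_of_ne (Ne.symm hv)]
    · have h0 : d.getD c 0 = 0 := PySem.Dict.getD_of_not_contains d 0 (by simpa using hc)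
      simp only [hc, Bool.false_eq_true, if_false, PySem.Dict.getD_insert]
      by_cases hv : v = c
      · subst hv; rw [if_pos rfl, List.count_cons_self, h0]; push_cast; ring
      · rw [if_neg hv, List.count_cons_of_ne (Ne.symm hv)]

theorem pvBuildA_getD (l : List Char) (v : Char) :
    (l.foldl (fun d c => if d.contains c then d.insert c (d.getD c 0 + 1) else d.insert c 1)
      (PySem.Dict.empty : PySem.Dict Char Int)).getD v 0 = (l.count v : Int) := by
  simp [pvBuildA_getD_gen]

-- A's document loop succeeds iff every scanned char's running count suffices
theorem pvLoopA_iff (l : List Char) (d : PySem.Dict Char Int)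
    (hnn : ∀ x, 0 ≤ d.getD x 0) :
    pvLoopA l d = true ↔ ∀ c ∈ l, (l.count c : Int) ≤ d.getD c 0 := by
  induction l generalizing d with
  | nil => simp [pvLoopA]
  | cons c rest ih =>
    by_cases hc : d.contains c = true
    · by_cases h0 : d.getD c 0 = 0
      · rw [show pvLoopA (c :: rest) d = false by simp [pvLoopA, hc, h0]]
        simp only [Bool.false_eq_true, false_iff]
        intro h
        have := h c (by simp)
        rw [List.count_cons_self, h0] at this
        push_cast at this
        have hcnt : 0 ≤ rest.count c := Nat.zero_le _
        omega
      · have h1 : (1 : Int) ≤ d.getD c 0 := by have := hnn c; omega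
        have hnn' : ∀ x, 0 ≤ (d.insert c (d.getD c 0 - 1)).getD x 0 := by
          intro x
          rw [PySem.Dict.getD_insert]
          by_cases hx : x = c
          · rw [if_pos hx]; omega
          · simp only [if_neg hx]; exact hnn x
        rw [show pvLoopA (c :: rest) d = pvLoopA rest (d.insert c (d.getD c 0 - 1)) by
          simp [pvLoopA, hc, h0]]
        rw [ih _ hnn']
        constructor
        · intro h x hx
          simp only [List.mem_cons] at hx
          by_cases hxc : x = c
          · subst hxc
            by_cases hm : x ∈ rest
            · have := h x hm
              rw [PySem.Dict.getD_insert, if_pos rfl] at this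
              rw [List.count_cons_self]
              push_cast at this ⊢
              omega
            · have hz : rest.count x = 0 := List.count_eq_zero_of_not_mem hm
              rw [List.count_cons_self, hz]
              push_cast
              omega
          · have hxr : x ∈ rest := by
              rcases hx with rfl | hx
              · exact absurd rfl hxc
              · exact hx
            have := h x hxr
            rw [PySem.Dict.getD_insert, if_neg hxc] at this
            rw [List.count_cons_of_ne (Ne.symm hxc)]
            exact this
        · intro h x hx
          rw [PySem.Dict.getD_insert]
          by_cases hxc : x = c
          · subst hxc
            have := h x (by simp)
            rw [List.count_cons_self] at this
            rw [if_pos rfl]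
            push_cast at this ⊢
            omega
          · have := h x (by simp [hx])
            rw [List.count_cons_of_ne (Ne.symm hxc)] at this
            rw [if_neg hxc]
            exact this
    · have h0 : d.getD c 0 = 0 := PySem.Dict.getD_of_not_contains d 0 (by simpa using hc)
      rw [show pvLoopA (c :: rest) d = false by simp [pvLoopA, hc]]
      simp only [Bool.false_eq_true, false_iff]
      intro h
      have := h c (by simp)
      rw [List.count_cons_self, h0] at this
      push_cast at this
      have hcnt : 0 ≤ rest.count c := Nat.zero_le _
      omega

-- multiset containment implies the length comparison A guards on
theorem pvLen_le {l1 l2 : List Char} (h : ∀ c, l1.count c ≤ l2.count c) :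
    l1.length ≤ l2.length := by
  have hm : (l1 : Multiset Char) ≤ (l2 : Multiset Char) :=
    Multiset.le_iff_count.2 (by simpa using h)
  simpa using Multiset.card_le_card hm

-- the merge scan on two ascending lists decides multiset containment
theorem pvMergeB_iff (cs ds : List Char)
    (hcs : cs.Pairwise (· ≤ ·)) (hds : ds.Pairwise (· ≤ ·)) :
    pvMergeB cs ds = true ↔ ∀ x, ds.count x ≤ cs.count x := by
  induction cs generalizing ds with
  | nil =>
    cases ds with
    | nil => simp [pvMergeB]
    | cons d dr =>
      simp only [pvMergeB, Bool.false_eq_true, false_iff, not_forall]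
      exact ⟨d, by simp⟩
  | cons c cr ih =>
    cases ds with
    | nil => simp [pvMergeB]
    | cons d dr =>
      have hcr : cr.Pairwise (· ≤ ·) := (List.pairwise_cons.1 hcs).2
      have hdr : dr.Pairwise (· ≤ ·) := (List.pairwise_cons.1 hds).2
      rcases lt_trichotomy c d with hlt | heq | hgt
      · -- c < d : advance i
        have hnm : c ∉ d :: dr := by
          intro hm
          rcases List.mem_cons.1 hm with rfl | hm
          · exact lt_irrefl _ hlt
          · exact absurd ((List.pairwise_cons.1 hds).1 c hm) (not_le.2 hlt)
        rw [show pvMergeB (c :: cr) (d :: dr) = pvMergeB cr (d :: dr) by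
          simp [pvMergeB, hlt]]
        rw [ih (d :: dr) hcr hds]
        constructor
        · intro h x
          calc (d :: dr).count x ≤ cr.count x := h x
            _ ≤ (c :: cr).count x := by
              by_cases hx : x = c
              · subst hx; rw [List.count_cons_self]; omega
              · rw [List.count_cons_of_ne (Ne.symm hx)]
        · intro h x
          by_cases hx : x = c
          · subst hx
            rw [List.count_eq_zero_of_not_mem hnm]
            exact Nat.zero_le _
          · have := h x
            rw [List.count_cons_of_ne (Ne.symm hx)] at this
            exact this
      · -- c == d : advance both
        subst heq
        rw [show pvMergeB (c :: cr) (c :: dr) = pvMergeB cr dr by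
          simp [pvMergeB]]
        rw [ih dr hcr hdr]
        constructor
        · intro h x
          by_cases hx : x = c
          · subst hx
            rw [List.count_cons_self, List.count_cons_self]
            have := h x; omega
          · rw [List.count_cons_of_ne (Ne.symm hx), List.count_cons_of_ne (Ne.symm hx)]
            exact h x
        · intro h x
          by_cases hx : x = c
          · subst hx
            have := h x
            rw [List.count_cons_self, List.count_cons_self] at this
            omega
          · have := h x
            rw [List.count_cons_of_ne (Ne.symm hx), List.count_cons_of_ne (Ne.symm hx)] at this
            exact this
      · -- c > d : char d unavailable
        have hnm : d ∉ c :: cr := by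
          intro hm
          rcases List.mem_cons.1 hm with rfl | hm
          · exact lt_irrefl _ hgt
          · exact absurd ((List.pairwise_cons.1 hcs).1 d hm) (not_le.2 hgt)
        rw [show pvMergeB (c :: cr) (d :: dr) = false by
          have h1 : ¬ c < d := not_lt.2 (le_of_lt hgt)
          have h2 : c ≠ d := ne_of_gt hgt
          simp [pvMergeB, h1, h2]]
        simp only [Bool.false_eq_true, false_iff, not_forall]
        refine ⟨d, ?_⟩
        rw [List.count_eq_zero_of_not_mem hnm, List.count_cons_self]
        omega

-- B computes exactly multiset containment
theorem pvAlt_iff (characters document : String) :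
    generate_doc_alt characters document = true ↔
      ∀ c, document.toList.count c ≤ characters.toList.count c := by
  unfold generate_doc_alt
  have hcs := PySem.List.sorted_pairwise characters.toList (fun c => c)
  have hds := PySem.List.sorted_pairwise document.toList (fun c => c)
  rw [pvMergeB_iff _ _ hcs hds]
  have pc := PySem.List.sorted_perm characters.toList (fun c => c) false
  have pd := PySem.List.sorted_perm document.toList (fun c => c) false
  constructor
  · intro h x; have := h x; rwa [pd.count_eq, pc.count_eq] at this
  · intro h x; rw [pd.count_eq, pc.count_eq]; exact h x

-- ===== VERDICT (by name: the statement is the Claim_ definition above) =====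
theorem generate_doc_spec : Claim_equal_generate_doc := by
  intro characters document _
  unfold Spec_generate_doc
  rw [Bool.eq_iff_iff, pvAlt_iff]
  unfold generate_doc
  constructor
  · intro h
    split at h
    · exact absurd h (by simp)
    · intro c
      have hnn : ∀ x, (0 : Int) ≤ (characters.toList.foldl
          (fun d c => if d.contains c then d.insert c (d.getD c 0 + 1) else d.insert c 1)
          (PySem.Dict.empty : PySem.Dict Char Int)).getD x 0 := by
        intro x; rw [pvBuildA_getD]; exact_mod_cast Nat.zero_le _
      rw [pvLoopA_iff _ _ hnn] at h
      by_cases hm : c ∈ document.toList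
      · have := h c hm
        rw [pvBuildA_getD] at this
        exact_mod_cast this
      · simp [List.count_eq_zero_of_not_mem hm]
  · intro h
    have hlen : ¬ characters.toList.length < document.toList.length := by
      have := pvLen_le h; omega
    rw [if_neg hlen]
    have hnn : ∀ x, (0 : Int) ≤ (characters.toList.foldl
        (fun d c => if d.contains c then d.insert c (d.getD c 0 + 1) else d.insert c 1)
        (PySem.Dict.empty : PySem.Dict Char Int)).getD x 0 := by
      intro x; rw [pvBuildA_getD]; exact_mod_cast Nat.zero_le _
    rw [pvLoopA_iff _ _ hnn]
    intro c _
    rw [pvBuildA_getD]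
    exact_mod_cast h c
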